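-- pv_equiv track=rewrite | github.com/camilavib00/KdP | tutoriuen/Tut07.py | f
-- ===== SOURCE A (Python) =====
-- def f(x):
--     c=1
--     res=0
--     while x>0:
--         res = res + c*(10-(x%10))
--         c*=10
--         x//=10
--     return res
-- ===== SOURCE B (Python) =====
-- def f(x):
--     # sum a repunit of powers of 10 up to x, then one algebraic formula:
--     # sum_i 10^i * (10 - d_i) = 10 * R_n - x
--     if x <= 0:
--         return 0
--     r = 0
--     p = 1
--     while p <= x:
--         r += p
--         p *= 10
--     return 10 * r - x
-- ===== Notes on version B (the rewrite author's own statement) =====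
-- stated objective: alternative
-- what changed: Replaces the per-digit accumulation res += c*(10 - x%10) with building the repunit R (sum of powers of 10 up to x) and returning 10*R - x by the identity sum_i 10^i*(10-d_i) = 10*R - x; no digit extraction at all.
import Mathlib
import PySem

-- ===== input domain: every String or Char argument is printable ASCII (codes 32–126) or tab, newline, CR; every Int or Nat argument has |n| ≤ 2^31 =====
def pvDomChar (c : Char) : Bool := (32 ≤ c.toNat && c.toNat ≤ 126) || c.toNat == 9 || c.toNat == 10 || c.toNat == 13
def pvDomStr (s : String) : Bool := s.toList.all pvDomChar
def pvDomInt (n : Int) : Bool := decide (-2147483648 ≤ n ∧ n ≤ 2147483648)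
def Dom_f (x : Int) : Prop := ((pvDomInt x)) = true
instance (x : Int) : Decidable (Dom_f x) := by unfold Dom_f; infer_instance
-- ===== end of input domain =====

-- B replaces the per-digit accumulation with a repunit sum plus one algebraic formula (alternative decomposition, same cost).

-- ===== PORT A =====
-- while x>0: res += c*(10 - x%10); c *= 10; x //= 10
def fLoop (x c res : Int) : Int :=
  if h : 0 < x then
    fLoop (PySem.Int.floordiv x 10) (c * 10) (res + c * (10 - PySem.Int.mod x 10))
  else res
termination_by x.toNat
decreasing_by
  have h10 : PySem.Int.floordiv x 10 = x / 10 := PySem.Int.floordiv_eq_ediv_of_pos (by omega)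
  rw [h10]; omega

def f (x : Int) : Int := fLoop x 1 0

-- ===== PORT B =====
-- if x<=0: 0; else sum powers of 10 ≤ x into r, return 10*r - x
def gLoop (x r p : Int) (hp : 0 < p) : Int :=
  if h : p ≤ x then gLoop x (r + p) (p * 10) (by positivity) else r
termination_by (x + 1 - p).toNat
decreasing_by
  have : p * 10 ≥ p + 9 := by nlinarith
  omega

def f_alt (x : Int) : Int :=
  if x ≤ 0 then 0 else 10 * gLoop x 0 1 (by norm_num) - x

-- ===== PRECONDITION & SPEC =====
def Spec_f (x : Int) (out : Int) : Prop := out = f_alt x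
instance (x : Int) (out : Int) : Decidable (Spec_f x out) := by unfold Spec_f; infer_instance

-- ===== CLAIM (what is proved, stated in full; the proofs are below) =====
def Claim_equal_f : Prop := ∀ (x : Int), Dom_f x → Spec_f x (f x)

-- ===== LEMMAS AND PROOFS =====

-- H y = repunit built from y: H y = 1 + 10*H(y/10) for y ≥ 1, else 0
def pvH (y : Int) : Int :=
  if h : 1 ≤ y then 1 + 10 * pvH (y / 10) else 0
termination_by y.toNat
decreasing_by omega

theorem pvH_nonpos {y : Int} (h : y < 1) : pvH y = 0 := by
  rw [pvH]; simp [Int.not_le.mpr h]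

theorem fLoop_unfold_pos {x : Int} (c res : Int) (h : 0 < x) :
    fLoop x c res = fLoop (x / 10) (c * 10) (res + c * (10 - x % 10)) := by
  rw [fLoop]
  simp [h]

theorem fLoop_nonpos {x : Int} (c res : Int) (h : ¬ 0 < x) : fLoop x c res = res := by
  rw [fLoop]; simp [h]

-- scaling: the A loop is linear in (res, c)
theorem fLoop_scale (x c res : Int) : fLoop x c res = res + c * fLoop x 1 0 := by
  induction hn : x.toNat using Nat.strong_induction_on generalizing x c res with
  | _ n ih =>
    by_cases h : 0 < x
    · rw [fLoop_unfold_pos c res h, fLoop_unfold_pos 1 0 h,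
          ih (x / 10).toNat (by omega) (x / 10) (c * 10) _ rfl,
          ih (x / 10).toNat (by omega) (x / 10) (1 * 10) _ rfl]
      ring
    · rw [fLoop_nonpos c res h, fLoop_nonpos 1 0 h]; ring

-- the B loop computes r + p * pvH (x / p)
theorem gLoop_eq (x r p : Int) (hp : 0 < p) : gLoop x r p hp = r + p * pvH (x / p) := by
  induction hn : (x + 1 - p).toNat using Nat.strong_induction_on generalizing r p with
  | _ n ih =>
    rw [gLoop]
    by_cases h : p ≤ x
    · rw [dif_pos h]
      have hp10 : (0:Int) < p * 10 := by positivity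
      have hm : (x + 1 - p * 10).toNat < n := by
        have : p * 10 ≥ p + 9 := by nlinarith
        omega
      rw [ih _ hm (r + p) (p * 10) hp10 rfl]
      have hdd : x / p / 10 = x / (p * 10) := Int.ediv_ediv_of_nonneg (by omega)
      have h1 : (1:Int) ≤ x / p := by
        rw [Int.le_ediv_iff_mul_le hp]; omega
      rw [show pvH (x / p) = 1 + 10 * pvH (x / p / 10) by rw [pvH]; simp [h1], hdd]
      ring
    · rw [dif_neg h]
      have : x / p < 1 := by
        rw [Int.ediv_lt_iff_lt_mul hp]; omega
      rw [pvH_nonpos this]; ring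

-- main: for 0 < x, the A loop from (1,0) equals 10 * pvH x - x
theorem fLoop_closed (x : Int) : 0 < x → fLoop x 1 0 = 10 * pvH x - x := by
  induction hn : x.toNat using Nat.strong_induction_on generalizing x with
  | _ n ih =>
    intro h
    rw [fLoop_unfold_pos 1 0 h, fLoop_scale (x / 10) (1 * 10) (0 + 1 * (10 - x % 10))]
    rw [show pvH x = 1 + 10 * pvH (x / 10) by rw [pvH]; simp [show (1:Int) ≤ x by omega]]
    by_cases h2 : 0 < x / 10
    · rw [ih (x / 10).toNat (by omega) (x / 10) rfl h2]
      ring_nf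
      omega
    · rw [fLoop_nonpos 1 0 h2, pvH_nonpos (by omega)]
      ring_nf
      omega

-- ===== VERDICT (by name: the statement is the Claim_ definition above) =====
theorem f_spec : Claim_equal_f := by
  intro x _
  unfold Spec_f f f_alt
  by_cases h : x ≤ 0
  · have hnp : ¬ 0 < x := by omega
    rw [fLoop_nonpos 1 0 hnp, if_pos h]
  · rw [if_neg h, gLoop_eq x 0 1 one_pos, fLoop_closed x (by omega)]
    simp
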